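-- pv_equiv track=rewrite | github.com/aphahn/incorporatedplaces | places.py | cleanup_name
-- ===== SOURCE A (Python) =====
-- def cleanup_name(name):
--     # Remove the last uncapitalized words
--     words = name.split()
--
--     words.reverse()
--
--     last_index = 0
--     for i, word in enumerate(words):
--         if not word.islower():
--             # We've found the last uncapitalized word
--             last_index = len(words) - i
--             break
--
--     # Back to normal
--     words.reverse()
--
--     words = words[0:last_index]
--     return " ".join(words)
-- ===== SOURCE B (Python) =====
-- def cleanup_name(name):
--     words = name.split()
--     while words and words[-1].islower():
--         words.pop()
--     return " ".join(words)
-- ===== Notes on version B (the rewrite author's own statement) =====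
-- stated objective: simpler
-- what changed: Replaces A's reverse/enumerate-with-break/re-reverse/slice computation of a keep-index by directly popping trailing all-lowercase words from the split list in a guarded while loop.
import Mathlib
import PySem

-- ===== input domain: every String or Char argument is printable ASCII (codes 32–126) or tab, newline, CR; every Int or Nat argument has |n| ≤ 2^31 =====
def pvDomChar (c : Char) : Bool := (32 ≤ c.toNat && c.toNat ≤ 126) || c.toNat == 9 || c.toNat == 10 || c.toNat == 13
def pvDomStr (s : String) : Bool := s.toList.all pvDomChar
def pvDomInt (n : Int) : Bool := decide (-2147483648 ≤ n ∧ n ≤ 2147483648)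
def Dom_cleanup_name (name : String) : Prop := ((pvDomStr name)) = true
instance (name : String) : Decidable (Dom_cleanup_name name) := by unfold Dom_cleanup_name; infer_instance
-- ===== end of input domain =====

-- B replaces A's reverse/enumerate-break/re-reverse/slice index computation with a direct
-- guarded while-pop of trailing all-lowercase words (objective: simpler). B also mutates
-- its local list only; A's observable behaviour (return value) is what is proved equal.


-- str.islower(): at least one cased character and no uppercase one.
-- Hand-ported (PySem has only the per-Char islower); exact on the ASCII domain,
-- where the cased characters are exactly the alphabetic ones.
def pyStrIslower (w : String) : Bool :=
  w.toList.any PySem.Chars.isalpha && w.toList.all (fun c => !PySem.Chars.isupper c)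

-- ===== PORT A =====
-- the 'for i, word in enumerate(words): if not word.islower(): last_index = len(words)-i; break'
-- loop, run over the reversed list; returns last_index (0 if the loop never breaks).
def pvALoop : List String → Nat → Nat → Nat
  | [], _, _ => 0
  | w :: rest, n, i => if !pyStrIslower w then n - i else pvALoop rest n (i + 1)

def cleanup_name (name : String) : String :=
  let words := PySem.Str.split₀ name
  let rev := words.reverse
  let last_index := pvALoop rev words.length 0
  PySem.Str.join " " (PySem.List.slice words (some 0) (some (last_index : Int)))

-- ===== PORT B =====
-- 'while words and words[-1].islower(): words.pop()'
def pvBTrim (ws : List String) : List String :=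
  match h : ws.getLast? with
  | some w => if pyStrIslower w then pvBTrim ws.dropLast else ws
  | none => ws
termination_by ws.length
decreasing_by
  have : ws ≠ [] := by
    intro hnil; rw [hnil] at h; simp at h
  clear h
  have hpos : 0 < ws.length := List.length_pos_of_ne_nil this
  simp [List.length_dropLast]
  omega

def cleanup_name_alt (name : String) : String :=
  PySem.Str.join " " (pvBTrim (PySem.Str.split₀ name))

-- ===== PRECONDITION & SPEC =====
def Spec_cleanup_name (name : String) (out : String) : Prop := out = cleanup_name_alt name
instance (name : String) (out : String) : Decidable (Spec_cleanup_name name out) := by unfold Spec_cleanup_name; infer_instance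

-- ===== CLAIM (what is proved, stated in full; the proofs are below) =====
def Claim_equal_cleanup_name : Prop := ∀ (name : String), Dom_cleanup_name name → Spec_cleanup_name name (cleanup_name name)

-- ===== LEMMAS AND PROOFS =====

theorem dropWhile_eq_drop {α : Type} (p : α → Bool) (l : List α) :
    l.dropWhile p = l.drop (l.takeWhile p).length := by
  induction l with
  | nil => rfl
  | cons a l ih => by_cases h : p a <;> simp [List.takeWhile, List.dropWhile, h, ih]

-- B's while-pop loop computes the reverse of dropping the leading lowercase run of the reverse.
theorem pvBTrim_eq (ws : List String) :
    pvBTrim ws = (ws.reverse.dropWhile pyStrIslower).reverse := by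
  induction ws using pvBTrim.induct with
  | case1 ws w h ht ih =>
    rw [pvBTrim, h]
    simp only [ht, if_true]
    obtain ⟨ys, rfl⟩ : ∃ ys, ws = ys ++ [w] := by
      rcases List.eq_nil_or_concat ws with rfl | ⟨ys, z, rfl⟩
      · simp at h
      · simp at h; exact ⟨ys, by simp [h]⟩
    simp [ht] at ih ⊢
    exact ih
  | case2 ws w h ht =>
    rw [pvBTrim, h]
    simp only [ht, if_false, Bool.false_eq_true]
    obtain ⟨ys, rfl⟩ : ∃ ys, ws = ys ++ [w] := by
      rcases List.eq_nil_or_concat ws with rfl | ⟨ys, z, rfl⟩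
      · simp at h
      · simp at h; exact ⟨ys, by simp [h]⟩
    simp [ht]
  | case3 ws h =>
    have : ws = [] := by simpa using h
    subst this; simp [pvBTrim]

-- characterisation of A's break loop
theorem pvALoop_eq (r : List String) (n i : Nat) :
    pvALoop r n i =
      if r.dropWhile pyStrIslower = [] then 0
      else n - (i + (r.takeWhile pyStrIslower).length) := by
  induction r generalizing i with
  | nil => simp [pvALoop]
  | cons w rest ih =>
    by_cases hw : pyStrIslower w
    · simp [pvALoop, hw, List.dropWhile, List.takeWhile, ih (i + 1)]
      split_ifs <;> omega
    · simp [pvALoop, hw, List.dropWhile, List.takeWhile]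

theorem trim_eq_slice (ws : List String) :
    PySem.List.slice ws (some 0) (some ((pvALoop ws.reverse ws.length 0 : Nat) : Int))
      = pvBTrim ws := by
  rw [pvBTrim_eq, pvALoop_eq]
  set k := (ws.reverse.takeWhile pyStrIslower).length with hk
  have hdw : ws.reverse.dropWhile pyStrIslower = ws.reverse.drop k := by
    rw [hk, dropWhile_eq_drop]
  by_cases hnil : ws.reverse.dropWhile pyStrIslower = []
  · rw [if_pos hnil, hnil]
    simp [PySem.List.slice_to ws (b := 0) le_rfl]
  · rw [if_neg hnil, hdw]
    have hklen : k ≤ ws.length := by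
      have := (List.takeWhile_sublist (l := ws.reverse) pyStrIslower).length_le
      simpa [hk] using this
    rw [PySem.List.slice_zero_start, PySem.List.slice_to_natCast]
    rw [List.reverse_drop]
    simp

-- ===== VERDICT (by name: the statement is the Claim_ definition above) =====
theorem cleanup_name_spec : Claim_equal_cleanup_name := by
  intro name _
  unfold Spec_cleanup_name cleanup_name cleanup_name_alt
  simp only []
  rw [trim_eq_slice]
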